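-- pv_equiv track=rewrite | github.com/yjsayya/Algorithms | 2. 문제유형/2-3.코딩테스트/진학/Problem3.py | solution
-- ===== SOURCE A (Python) =====
-- def solution(orders):
--     # 1. dict으로 {유저:주문 메뉴} 구하기
--     dic = dict()
--     for order in orders:
--         arr = order.split(" ")
--         name = arr[0]
--         se = set(arr[1:])
--
--         if name in dic:
--             dic[name] = dic[name].union(se)
--         else:
--             dic[name] = se
--     # 2. 주문한 음식 수가 많은 순으로 정렬하기
--     li = sorted(dic.keys(), key= lambda x : (-len(dic[x]) ,x))
--     # 3. 정렬하기
--     ans = []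
--     maxi = len(dic[li[0]])
--     for name in li:
--         if len(dic[name]) == maxi:
--             ans.append(name)
--         else:
--             break
--
--     return ans
-- ===== SOURCE B (Python) =====
-- def solution(orders):
--     dic = {}
--     for order in orders:
--         arr = order.split(" ")
--         name = arr[0]
--         if name in dic:
--             dic[name] = dic[name].union(arr[1:])
--         else:
--             dic[name] = set(arr[1:])
--     maxi = max(len(s) for s in dic.values())
--     return sorted(name for name in dic if len(dic[name]) == maxi)
-- ===== Notes on version B (the rewrite author's own statement) =====
-- stated objective: alternative
-- what changed: A sorts all user names by the tuple key (-menu_count, name) and scans the sorted prefix with a break; B instead takes one max pass over the aggregated menu counts, filters the tied names, and sorts only that tied subset.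
import Mathlib
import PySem

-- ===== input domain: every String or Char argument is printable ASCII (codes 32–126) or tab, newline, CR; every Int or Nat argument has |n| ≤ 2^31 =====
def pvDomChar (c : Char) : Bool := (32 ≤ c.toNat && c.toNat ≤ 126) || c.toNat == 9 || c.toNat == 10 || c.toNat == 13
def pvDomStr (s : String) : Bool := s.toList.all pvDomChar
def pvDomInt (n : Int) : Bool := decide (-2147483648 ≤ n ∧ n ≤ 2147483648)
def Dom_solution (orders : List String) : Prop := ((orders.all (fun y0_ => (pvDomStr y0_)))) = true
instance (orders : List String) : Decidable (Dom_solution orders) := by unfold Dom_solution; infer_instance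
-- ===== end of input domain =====

-- B keeps A's aggregation loop but replaces A's full sort of all keys by tuple key + prefix scan
-- with: one max pass over the values, a filter of the tied names, and a sort of the tied subset only.


-- ===== PORT A =====
-- order.split(" ") (sep nonempty, so split? is always `some`)
def pvSplit (order : String) : List String := (PySem.Str.split? order " ").getD [""]

-- arr[0] (split(" ") always returns a nonempty list, so headI is exact)
def pvName (order : String) : String := (pvSplit order).headI

-- set(arr[1:])
def pvMenus (order : String) : PySem.Set String :=
  PySem.Set.ofList (PySem.List.slice (pvSplit order) (some 1) none)

-- the aggregation loop shared verbatim by A and B: dic[name] = dic[name] ∪ se / se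
def buildDic (orders : List String) : PySem.Dict String (PySem.Set String) :=
  orders.foldl
    (fun dic order =>
      if dic.contains (pvName order) then
        dic.insert (pvName order) (PySem.Set.union (dic.getD (pvName order) []) (pvMenus order))
      else
        dic.insert (pvName order) (pvMenus order))
    PySem.Dict.empty

-- A's `for name in li: if len(dic[name]) == maxi: ans.append(name) else: break`
def takeEq (dic : PySem.Dict String (PySem.Set String)) (maxi : Nat) : List String → List String
  | [] => []
  | n :: t => if (dic.getD n []).length = maxi then n :: takeEq dic maxi t else []

def solution (orders : List String) : List String :=
  let dic := buildDic orders
  let li := PySem.List.sorted2 dic.keys (fun x => -(((dic.getD x []).length : Int))) (fun x => x) false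
  match PySem.List.pyGet? li 0 with
  | none => []          -- Python raises IndexError here (li[0] on empty li); excluded by Pre_solution
  | some h => takeEq dic ((dic.getD h []).length) li

-- ===== PORT B =====
def solution_alt (orders : List String) : List String :=
  let dic := buildDic orders
  match dic.values with
  | [] => []            -- Python raises ValueError here (max of empty); excluded by Pre_solution
  | v :: vs =>
    let maxi := vs.foldl (fun acc s => max acc s.length) v.length
    PySem.List.sorted (dic.keys.filter (fun n => (dic.getD n []).length == maxi)) (fun x => x) false

-- ===== PRECONDITION & SPEC =====
-- On orders = [] both Pythons raise (A: IndexError on li[0]; B: ValueError on max of empty).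
def Pre_solution (orders : List String) : Prop := orders ≠ []
instance (orders : List String) : Decidable (Pre_solution orders) := by unfold Pre_solution; infer_instance

def pvWitness_solution : List String := ["u a b", "v a", "u c"]

def Spec_solution (orders : List String) (out : List String) : Prop := out = solution_alt orders
instance (orders : List String) (out : List String) : Decidable (Spec_solution orders out) := by unfold Spec_solution; infer_instance

-- ===== CLAIM (what is proved, stated in full; the proofs are below) =====
def Claim_equal_solution : Prop := ∀ (orders : List String), Dom_solution orders → Pre_solution orders → Spec_solution orders (solution orders)

-- ===== LEMMAS AND PROOFS =====

-- the two if-branches both assign dic[name], so the loop is an insert-at-key loop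
theorem buildDic_eq (orders : List String) :
    buildDic orders = orders.foldl
      (fun dic order => dic.insert (pvName order)
        (if dic.contains (pvName order) then
          PySem.Set.union (dic.getD (pvName order) []) (pvMenus order)
        else pvMenus order))
      PySem.Dict.empty := by
  unfold buildDic
  congr 1
  funext dic order
  exact (apply_ite (dic.insert (pvName order)) _ _ _).symm

theorem keys_buildDic_nodup (orders : List String) : (buildDic orders).keys.Nodup := by
  rw [buildDic_eq]
  exact PySem.Dict.nodup_keys_foldl_insert_key orders pvName _ _ (by simp [PySem.Dict.empty, PySem.Dict.keys])

theorem keys_buildDic_ne_nil (orders : List String) (h : orders ≠ []) :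
    (buildDic orders).keys ≠ [] := by
  obtain ⟨o, rest, rfl⟩ := List.exists_cons_of_ne_nil h
  have hk := PySem.Dict.keys_foldl_insert_key (ν := PySem.Set String) (o :: rest) pvName
    (fun dic order => if dic.contains (pvName order) then
        PySem.Set.union (dic.getD (pvName order) []) (pvMenus order)
      else pvMenus order) PySem.Dict.empty
  rw [buildDic_eq, hk]
  intro hnil
  have : pvName o ∈ PySem.Set.update (PySem.Dict.empty (κ := String) (ν := PySem.Set String)).keys ((o :: rest).map pvName) := by
    rw [PySem.Set.mem_update]
    exact Or.inr (by simp)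
  rw [hnil] at this
  exact (List.not_mem_nil) this

-- sorted2 with keys into Int and String is sorted with the lexicographic key
theorem sorted2_eq_sorted_lex {α : Type} (xs : List α) (k1 : α → Int) (k2 : α → String) :
    PySem.List.sorted2 xs k1 k2 false = PySem.List.sorted xs (fun x => toLex (k1 x, k2 x)) false := by
  unfold PySem.List.sorted2 PySem.List.sorted
  simp only [if_neg (by decide : ¬ (false = true))]
  congr 1
  funext acc x
  congr 1
  funext a b
  rcases lt_trichotomy (k1 a) (k1 b) with h | h | h
  · simp [Prod.Lex.lt_iff, h, asymm h]
  · simp [Prod.Lex.lt_iff, h]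
  · simp only [Prod.Lex.lt_iff, ofLex_toLex]
    simp [asymm h, ne_of_gt h, not_le.mpr h]

-- A's append/break loop on an f-nonincreasing list whose values are ≤ maxi is a filter
theorem takeEq_eq_filter (dic : PySem.Dict String (PySem.Set String)) (maxi : Nat)
    (l : List String)
    (hpw : l.Pairwise (fun a b => (dic.getD b []).length ≤ (dic.getD a []).length))
    (hub : ∀ n ∈ l, (dic.getD n []).length ≤ maxi) :
    takeEq dic maxi l = l.filter (fun n => (dic.getD n []).length == maxi) := by
  induction l with
  | nil => rfl
  | cons n t ih =>
    rw [List.pairwise_cons] at hpw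
    by_cases hn : (dic.getD n []).length = maxi
    · rw [takeEq, if_pos hn, List.filter_cons_of_pos (by simpa using hn),
        ih hpw.2 (fun m hm => hub m (List.mem_cons_of_mem n hm))]
    · rw [takeEq, if_neg hn, List.filter_cons_of_neg (by simpa using hn)]
      have hlt : (dic.getD n []).length < maxi :=
        lt_of_le_of_ne (hub n (List.mem_cons_self)) hn
      symm
      rw [List.filter_eq_nil_iff]
      intro m hm
      simp only [beq_iff_eq]
      exact Nat.ne_of_lt (lt_of_le_of_lt (hpw.1 m hm) hlt)

-- ===== VERDICT (by name: the statement is the Claim_ definition above) =====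
theorem solution_spec : Claim_equal_solution := by
  intro orders _hdom hpre
  unfold Spec_solution solution solution_alt
  have hnd := keys_buildDic_nodup orders
  have hne := keys_buildDic_ne_nil orders hpre
  set d := buildDic orders with hd
  simp only []
  rw [sorted2_eq_sorted_lex]
  set f : String → Nat := fun n => (d.getD n []).length with hf
  set key : String → Lex (Int × String) := fun x => toLex (-((f x : Nat) : Int), x) with hkey
  -- destruct the sorted list (nonempty since keys ≠ [])
  have hsne : PySem.List.sorted d.keys key false ≠ [] := by
    rw [Ne, PySem.List.sorted_eq_nil_iff]; exact hne
  obtain ⟨h0, t, hli⟩ := List.exists_cons_of_ne_nil hsne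
  rw [hli]
  -- destruct values (nonempty since keys ≠ [])
  obtain ⟨k0, ks, hkeys⟩ := List.exists_cons_of_ne_nil hne
  have hvals : d.values = (k0 :: ks).map (fun k => d.getD k []) := by
    rw [← hkeys]; exact PySem.Dict.values_eq_map_keys d hnd []
  rw [hvals]
  simp only [List.map_cons, PySem.List.pyGet?]
  simp only [PySem.List.pyIdx?]
  norm_num
  -- the head of the sorted list maximises the menu count
  have hh0mem : h0 ∈ d.keys :=
    ((PySem.List.sorted_perm d.keys key false).mem_iff).mp (by rw [hli]; exact List.mem_cons_self)
  have hmax : ∀ y ∈ d.keys, (d.getD y []).length ≤ (d.getD h0 []).length := by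
    intro y hy
    have hle := PySem.List.key_head_sorted_le d.keys key hli y hy
    rw [hkey, Prod.Lex.le_iff] at hle
    simp only [ofLex_toLex, hf] at hle
    rcases hle with hlt | ⟨heq, _⟩
    · omega
    · omega
  -- B's running maximum over the values equals the head's menu count
  set M := List.foldl (fun acc s => max acc (List.length s)) (List.length (d.getD k0 []))
      (List.map (fun k => d.getD k []) ks) with hM
  have hM2 : M = List.foldl max (List.length (d.getD k0 []))
      (ks.map (fun k => (d.getD k []).length)) := by
    rw [hM, List.foldl_map, List.foldl_map]
  have hMle : M ≤ (d.getD h0 []).length := by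
    rw [hM2]
    rcases PySem.List.foldl_max_mem (ks.map (fun k => (d.getD k []).length))
        (List.length (d.getD k0 [])) with hcase | hcase
    · rw [hcase]; exact hmax k0 (by rw [hkeys]; exact List.mem_cons_self)
    · obtain ⟨k, hk, hkeq⟩ := List.mem_map.mp hcase
      rw [← hkeq]; exact hmax k (by rw [hkeys]; exact List.mem_cons_of_mem k0 hk)
  have hM3 : M = List.foldl (fun acc k => max acc (d.getD k []).length)
      (List.length (d.getD k0 [])) ks := by
    rw [hM, List.foldl_map]
  have hleM : (d.getD h0 []).length ≤ M := by
    rw [hM3]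
    have hb := PySem.List.le_foldl_max_nat ks (fun k => (d.getD k []).length)
        (List.length (d.getD k0 []))
    rcases List.mem_cons.mp (hkeys ▸ hh0mem) with rfl | hmem
    · exact hb.1
    · exact hb.2 h0 hmem
  have hMeq : M = (d.getD h0 []).length := le_antisymm hMle hleM
  rw [hMeq]
  -- A's append/break loop over the sorted list is a filter
  have hpwk : (h0 :: t).Pairwise (fun a b => key a ≤ key b) := by
    rw [← hli]; exact PySem.List.sorted_pairwise d.keys key
  have hmemli : ∀ n ∈ h0 :: t, n ∈ d.keys := by
    intro n hn
    exact ((PySem.List.sorted_perm d.keys key false).mem_iff).mp (by rw [hli]; exact hn)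
  rw [takeEq_eq_filter d (List.length (d.getD h0 [])) (h0 :: t)
      (hpwk.imp_of_mem (fun {a b} _ _ hab => by
        rw [hkey, Prod.Lex.le_iff] at hab
        simp only [ofLex_toLex, hf] at hab
        rcases hab with hlt | ⟨heq, _⟩ <;> omega))
      (fun n hn => hmax n (hmemli n hn))]
  -- the filtered tied names are already strictly sorted, so sorting the tied subset gives them
  symm
  apply PySem.List.sorted_eq_of_perm_of_pairwise_lt
  · exact List.Perm.filter _ (by rw [← hli]; exact PySem.List.sorted_perm d.keys key false)
  · have hnodup : (h0 :: t).Nodup := by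
      rw [← hli]
      exact ((PySem.List.sorted_perm d.keys key false).nodup_iff).mpr hnd
    have hand : (h0 :: t).Pairwise (fun a b => key a ≤ key b ∧ a ≠ b) := hpwk.and hnodup
    refine (hand.filter _).imp_of_mem (fun {a b} ha hb hab => ?_)
    have hpa := List.of_mem_filter ha
    have hpb := List.of_mem_filter hb
    simp only [beq_iff_eq] at hpa hpb
    obtain ⟨hab1, hab2⟩ := hab
    rw [hkey, Prod.Lex.le_iff] at hab1
    simp only [ofLex_toLex, hf] at hab1
    have : a ≤ b := by
      rcases hab1 with hlt | ⟨_, hle⟩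
      · omega
      · exact hle
    exact lt_of_le_of_ne this hab2
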